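-- pv_equiv track=rewrite | github.com/chanwoong114/Coding_practice | algorithm/6. Start/Start2/암호코드_스캔.py | zero_check
-- ===== SOURCE A (Python) =====
-- def zero_check(s):
--     z_check = 0
--     for aa in range(len(s)):
--         if s[aa] == '0':
--             z_check += 1
--         else:
--             z_check = 0
--
--         if z_check == 4:
--             return True
--     return False
-- ===== SOURCE B (Python) =====
-- def zero_check(s):
--     stops = [-1] + [i for i, c in enumerate(s) if c != '0'] + [len(s)]
--     return any(b - a >= 5 for a, b in zip(stops, stops[1:]))
-- ===== Notes on version B (the rewrite author's own statement) =====
-- stated objective: alternative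
-- what changed: Instead of A's streaming run counter with early return, B builds the list of positions of all non-'0' characters bracketed by sentinels -1 and len(s), and then tests whether some adjacent pair of boundaries is at least 5 apart (i.e. encloses at least four zeros).
import Mathlib
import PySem

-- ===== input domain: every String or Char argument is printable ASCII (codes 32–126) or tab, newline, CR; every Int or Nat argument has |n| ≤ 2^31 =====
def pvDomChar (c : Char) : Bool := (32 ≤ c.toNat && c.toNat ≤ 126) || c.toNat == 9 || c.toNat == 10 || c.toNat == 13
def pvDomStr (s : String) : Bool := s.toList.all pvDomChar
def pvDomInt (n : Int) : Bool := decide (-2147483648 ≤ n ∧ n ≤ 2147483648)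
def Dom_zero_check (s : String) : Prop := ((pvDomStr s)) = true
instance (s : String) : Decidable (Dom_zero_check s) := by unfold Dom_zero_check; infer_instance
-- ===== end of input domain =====

-- B drops A's streaming run counter: it first collects the positions of all non-'0' characters
-- (with sentinels -1 and len(s)) and then asks whether two adjacent boundaries are ≥ 5 apart;
-- alternative staged-passes algorithm, same O(n) cost.

-- ===== PORT A =====
-- A's loop over range(len(s)) with counter z_check and early return, as structural recursion over the characters.
def zcGo : List Char → Nat → Bool
  | [], _ => false
  | c :: rest, z =>
      let z' := if c = '0' then z + 1 else 0
      if z' = 4 then true else zcGo rest z'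

def zero_check (s : String) : Bool := zcGo s.toList 0

-- ===== PORT B =====
-- stops = [-1] + [i for i, c in enumerate(s) if c != '0'] + [len(s)]
-- return any(b - a >= 5 for a, b in zip(stops, stops[1:]))
def zero_check_alt (s : String) : Bool :=
  let stops : List Int :=
    [-1] ++ ((PySem.List.enumerate s.toList 0).filter (fun p => p.2 != '0')).map (fun p => p.1)
      ++ [PySem.Str.len s]
  (stops.zip (PySem.List.slice stops (some 1) none)).any (fun p => decide (5 ≤ p.2 - p.1))

-- ===== PRECONDITION & SPEC =====
def Spec_zero_check (s : String) (out : Bool) : Prop := out = zero_check_alt s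
instance (s : String) (out : Bool) : Decidable (Spec_zero_check s out) := by unfold Spec_zero_check; infer_instance

-- ===== CLAIM (what is proved, stated in full; the proofs are below) =====
def Claim_equal_zero_check : Prop := ∀ (s : String), Dom_zero_check s → Spec_zero_check s (zero_check s)

-- ===== LEMMAS AND PROOFS =====

-- Proof-only helpers: the boundary positions of l viewed from absolute index k …
def nzAux (k : Int) : List Char → List Int
  | [] => []
  | c :: r => if c = '0' then nzAux (k + 1) r else k :: nzAux (k + 1) r

-- … the adjacent-gap test …
def pairsAny (xs : List Int) : Bool := (xs.zip xs.tail).any (fun p => decide (5 ≤ p.2 - p.1))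

-- … and a streaming reading of the gap test: prev = last boundary, idx = current position.
def gapCheck (prev idx : Int) : List Char → Bool
  | [] => decide (5 ≤ idx - prev)
  | c :: r => if c = '0' then gapCheck prev (idx + 1) r
              else (decide (5 ≤ idx - prev) || gapCheck idx (idx + 1) r)

-- The port's filtered enumeration is nzAux.
theorem enumerate_filter_eq_nzAux (l : List Char) (k : Int) :
    ((PySem.List.enumerate l k).filter (fun p => p.2 != '0')).map (fun p => p.1) = nzAux k l := by
  induction l generalizing k with
  | nil => simp [PySem.List.enumerate_nil, nzAux]
  | cons c r ih =>
      by_cases hc : c = '0' <;>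
        simp [PySem.List.enumerate_cons, nzAux, hc, ih]

theorem pairsAny_cons_cons (a b : Int) (t : List Int) :
    pairsAny (a :: b :: t) = (decide (5 ≤ b - a) || pairsAny (b :: t)) := by
  simp [pairsAny, List.zip]

-- The staged gap test over the boundary list equals the streaming gap test.
theorem pairsAny_eq_gapCheck (l : List Char) (k prev : Int) :
    pairsAny (prev :: (nzAux k l ++ [k + l.length])) = gapCheck prev k l := by
  induction l generalizing k prev with
  | nil => simp [nzAux, pairsAny, List.zip, gapCheck]
  | cons c r ih =>
      by_cases hc : c = '0'
      · have hlen : k + ((c :: r).length : Int) = (k + 1) + (r.length : Int) := by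
          simp; omega
        rw [show nzAux k (c :: r) = nzAux (k + 1) r by simp [nzAux, hc], hlen, ih, ]
        simp [gapCheck, hc]
      · have hlen : k + ((c :: r).length : Int) = (k + 1) + (r.length : Int) := by
          simp; omega
        rw [show nzAux k (c :: r) = k :: nzAux (k + 1) r by simp [nzAux, hc], hlen]
        rw [List.cons_append, pairsAny_cons_cons, ih]
        simp [gapCheck, hc]

-- Invariant of the streaming gap test: at position prev+1+z (z zeros consumed since the last
-- boundary) it returns true iff l supplies the missing 4-z zeros, or a run of four lies further on.
theorem gapCheck_iff (l : List Char) (prev : Int) (z : Nat) :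
    gapCheck prev (prev + 1 + z) l = true ↔
      (List.replicate (4 - z) '0' <+: l ∨ ['0', '0', '0', '0'] <:+: l) := by
  induction l generalizing prev z with
  | nil =>
      simp [gapCheck, List.prefix_nil, List.replicate_eq_nil_iff]
      omega
  | cons c r ih =>
      by_cases hc : c = '0'
      · subst hc
        have hstep : gapCheck prev (prev + 1 + z) ('0' :: r)
            = gapCheck prev (prev + 1 + (z + 1 : Nat)) r := by
          simp [gapCheck]; congr 1; ring
        rw [hstep, ih]
        by_cases h4 : 4 ≤ z
        · have e1 : 4 - (z + 1) = 0 := by omega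
          have e2 : 4 - z = 0 := by omega
          simp [e1, e2]
        · by_cases h3 : z = 3
          · subst h3
            simp [List.replicate_succ]
          · have h41 : 4 - z = (3 - z) + 1 := by omega
            have h34 : 4 - (z + 1) = 3 - z := by omega
            rw [h34, h41, List.replicate_succ, List.infix_cons_iff]
            constructor
            · rintro (h | h)
              · exact Or.inl (List.cons_prefix_cons.mpr ⟨rfl, h⟩)
              · exact Or.inr (Or.inr h)
            · rintro (h | h | h)
              · exact Or.inl (List.cons_prefix_cons.mp h).2
              · have h0 : List.replicate 3 '0' <+: r := by
                  have := (List.cons_prefix_cons.mp h).2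
                  simpa [List.replicate_succ] using this
                have h5 : List.replicate (3 - z) '0' <+: List.replicate 3 '0' :=
                  ⟨List.replicate z '0', by rw [← List.replicate_add]; congr 1; omega⟩
                exact Or.inl (h5.trans h0)
              · exact Or.inr h
      · have hstep : gapCheck prev (prev + 1 + z) (c :: r)
            = (decide (5 ≤ prev + 1 + z - prev)
                || gapCheck (prev + 1 + z) ((prev + 1 + z) + 1 + (0 : Nat)) r) := by
          simp [gapCheck, hc]
        rw [hstep]
        have h1 : ¬ (['0', '0', '0', '0'] <+: c :: r) := by
          intro h; exact hc (List.cons_prefix_cons.mp h).1.symm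
        constructor
        · intro h
          rcases Bool.or_eq_true_iff.mp h with h | h
          · have hz : 4 ≤ z := by
              have := of_decide_eq_true h; omega
            have e2 : 4 - z = 0 := by omega
            simp [e2]
          · rcases (ih _ _).mp h with h | h
            · exact Or.inr ((List.infix_cons_iff).mpr (Or.inr (by simpa using h.isInfix)))
            · exact Or.inr ((List.infix_cons_iff).mpr (Or.inr h))
        · intro h
          apply Bool.or_eq_true_iff.mpr
          rcases h with h | h
          · by_cases h4 : 4 ≤ z
            · exact Or.inl (by apply decide_eq_true; omega)
            · exfalso
              have h41 : 4 - z = (3 - z) + 1 := by omega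
              rw [h41, List.replicate_succ] at h
              exact hc (List.cons_prefix_cons.mp h).1.symm
          · rcases (List.infix_cons_iff).mp h with h | h
            · exact absurd h h1
            · exact Or.inr ((ih _ _).mpr (Or.inr h))

-- Invariant of A's loop: with z ≤ 3 zeros already consumed, it returns true iff
-- l starts with the 4 - z missing zeros, or contains a run of four zeros elsewhere.
theorem zcGo_iff (l : List Char) (z : Nat) (hz : z ≤ 3) :
    zcGo l z = true ↔
      (List.replicate (4 - z) '0' <+: l ∨ ['0', '0', '0', '0'] <:+: l) := by
  induction l generalizing z with
  | nil =>
      simp [zcGo, List.prefix_nil, List.replicate_eq_nil_iff]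
      omega
  | cons c rest ih =>
      by_cases hc : c = '0'
      · subst hc
        by_cases h3 : z = 3
        · subst h3
          simp [zcGo, List.replicate_succ]
        · have hz' : z + 1 ≤ 3 := by omega
          have h41 : 4 - z = (3 - z) + 1 := by omega
          rw [show zcGo ('0' :: rest) z = zcGo rest (z + 1) by
                simp [zcGo]; omega,
              ih (z + 1) hz']
          have h34 : 4 - (z + 1) = 3 - z := by omega
          rw [h34, h41, List.replicate_succ, List.infix_cons_iff]
          constructor
          · rintro (h | h)
            · exact Or.inl (List.cons_prefix_cons.mpr ⟨rfl, h⟩)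
            · exact Or.inr (Or.inr h)
          · rintro (h | h | h)
            · exact Or.inl (List.cons_prefix_cons.mp h).2
            · have h0 : List.replicate 3 '0' <+: rest := by
                have := (List.cons_prefix_cons.mp h).2
                simpa [List.replicate_succ] using this
              have h5 : List.replicate (3 - z) '0' <+: List.replicate 3 '0' :=
                ⟨List.replicate z '0', by rw [← List.replicate_add]; congr 1; omega⟩
              exact Or.inl (h5.trans h0)
            · exact Or.inr h
      · rw [show zcGo (c :: rest) z = zcGo rest 0 by simp [zcGo, hc],
            ih 0 (by omega)]
        have h1 : ¬ (List.replicate (4 - z) '0' <+: c :: rest) := by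
          intro h
          have h4 : 4 - z = (3 - z) + 1 := by omega
          rw [h4, List.replicate_succ] at h
          exact hc (List.cons_prefix_cons.mp h).1.symm
        have h2 : ¬ (['0', '0', '0', '0'] <+: c :: rest) := by
          intro h
          exact hc (List.cons_prefix_cons.mp h).1.symm
        rw [List.infix_cons_iff]
        constructor
        · rintro (h | h)
          · exact Or.inr (Or.inr (by simpa using h.isInfix))
          · exact Or.inr (Or.inr h)
        · rintro (h | h | h)
          · exact absurd h h1
          · exact absurd h h2
          · exact Or.inr h

-- ===== VERDICT (by name: the statement is the Claim_ definition above) =====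
theorem zero_check_spec : Claim_equal_zero_check := by
  intro s _
  unfold Spec_zero_check zero_check zero_check_alt
  simp only [PySem.List.slice_from_one, enumerate_filter_eq_nzAux]
  have hlen : PySem.Str.len s = (0 : Int) + (s.toList.length : Int) := by
    simp [PySem.Str.len_eq]
  rw [hlen,
      show [-1] ++ nzAux 0 s.toList ++ [(0 : Int) + (s.toList.length : Int)]
        = (-1 : Int) :: (nzAux 0 s.toList ++ [(0 : Int) + (s.toList.length : Int)]) by simp]
  rw [show (((-1 : Int) :: (nzAux 0 s.toList ++ [(0 : Int) + (s.toList.length : Int)])).zip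
        ((-1 : Int) :: (nzAux 0 s.toList ++ [(0 : Int) + (s.toList.length : Int)])).tail).any
        (fun p => decide (5 ≤ p.2 - p.1))
      = pairsAny ((-1 : Int) :: (nzAux 0 s.toList ++ [(0 : Int) + (s.toList.length : Int)])) from rfl]
  rw [pairsAny_eq_gapCheck]
  apply Bool.eq_iff_iff.mpr
  rw [zcGo_iff _ 0 (by omega),
      show (0 : Int) = (-1 : Int) + 1 + ((0 : Nat) : Int) by norm_num,
      gapCheck_iff]
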